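-- pv_equiv track=rewrite | github.com/pypi-data/pypi-mirror-376 | packages/random-neural-net-models/random_neural_net_models-0.3.1.tar.gz/random_neural_net_models-0.3.1/src/random_neural_net_models/data.py | get_index_ranges_from_n_cats_per_col
-- ===== SOURCE A (Python) =====
-- import typing as T
--
-- def get_index_ranges_from_n_cats_per_col(
--     n_categories_per_column: T.Iterable[int],
-- ) -> T.List[T.Tuple[int]]:
--     if len(n_categories_per_column) == 0:
--         msg = f"{n_categories_per_column=} must have at least one element"
--         raise ValueError(msg)
--     if any(v < 1 for v in n_categories_per_column):
--         msg = (
--             f"{n_categories_per_column=} must have only elements greater than 0"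
--         )
--         raise ValueError(msg)
--
--     index_ranges = []
--     offset = 0
--     for n_cats in n_categories_per_column:
--         _range = tuple(range(offset, offset + n_cats))
--         index_ranges.append(_range)
--         offset += n_cats
--     return index_ranges
-- ===== SOURCE B (Python) =====
-- def get_index_ranges_from_n_cats_per_col(
--     n_categories_per_column,
-- ):
--     if len(n_categories_per_column) == 0:
--         msg = f"{n_categories_per_column=} must have at least one element"
--         raise ValueError(msg)
--     if any(v < 1 for v in n_categories_per_column):
--         msg = (
--             f"{n_categories_per_column=} must have only elements greater than 0"
--         )
--         raise ValueError(msg)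
--
--     bounds = [0]
--     for n_cats in n_categories_per_column:
--         bounds.append(bounds[-1] + n_cats)
--     return [tuple(range(lo, hi)) for lo, hi in zip(bounds, bounds[1:])]
-- ===== Notes on version B (the rewrite author's own statement) =====
-- stated objective: alternative
-- what changed: B first builds the cumulative-boundary (prefix-sum) table and then produces all ranges in one pairwise zip comprehension, instead of A's single loop that appends ranges while mutating a running offset.
import Mathlib
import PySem

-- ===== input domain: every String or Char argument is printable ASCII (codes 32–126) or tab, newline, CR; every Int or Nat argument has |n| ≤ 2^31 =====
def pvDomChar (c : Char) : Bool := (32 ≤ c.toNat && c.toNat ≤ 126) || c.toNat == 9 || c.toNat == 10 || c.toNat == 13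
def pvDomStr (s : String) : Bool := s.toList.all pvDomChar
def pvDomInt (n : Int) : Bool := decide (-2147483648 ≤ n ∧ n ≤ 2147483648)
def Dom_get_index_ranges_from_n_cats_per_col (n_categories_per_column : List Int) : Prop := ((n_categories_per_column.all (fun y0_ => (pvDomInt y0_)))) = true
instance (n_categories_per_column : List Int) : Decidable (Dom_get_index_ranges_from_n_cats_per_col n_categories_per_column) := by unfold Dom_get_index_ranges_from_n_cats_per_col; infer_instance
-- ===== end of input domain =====

-- B replaces A's mutable running offset with a precomputed prefix-sum boundary table
-- consumed by a pairwise zip comprehension (objective: alternative decomposition).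

-- ===== PORT A =====
-- A's loop: append tuple(range(offset, offset + n_cats)), then offset += n_cats.
def get_index_ranges_from_n_cats_per_col (n_categories_per_column : List Int) : List (List Int) :=
  (n_categories_per_column.foldl
    (fun (st : List (List Int) × Int) n_cats =>
      (st.1 ++ [PySem.List.pyRange st.2 (st.2 + n_cats) 1], st.2 + n_cats))
    ([], 0)).1

-- ===== PORT B =====
-- B's boundary loop: bounds = [0]; for n_cats: bounds.append(bounds[-1] + n_cats)
def pvBounds (n_categories_per_column : List Int) : List Int :=
  n_categories_per_column.foldl (fun bs n_cats => bs ++ [bs.getLast! + n_cats]) [0]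

-- [tuple(range(lo, hi)) for lo, hi in zip(bounds, bounds[1:])]
def get_index_ranges_from_n_cats_per_col_alt (n_categories_per_column : List Int) : List (List Int) :=
  let bounds := pvBounds n_categories_per_column
  (bounds.zip (bounds.drop 1)).map (fun p => PySem.List.pyRange p.1 p.2 1)

-- ===== PRECONDITION & SPEC =====
-- Pre_ excludes exactly the inputs on which A raises ValueError: the empty list and
-- lists containing an element < 1.
def Pre_get_index_ranges_from_n_cats_per_col (n_categories_per_column : List Int) : Prop :=
  n_categories_per_column ≠ [] ∧ ∀ v ∈ n_categories_per_column, 1 ≤ v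
instance (n_categories_per_column : List Int) : Decidable (Pre_get_index_ranges_from_n_cats_per_col n_categories_per_column) := by unfold Pre_get_index_ranges_from_n_cats_per_col; infer_instance

def pvWitness_get_index_ranges_from_n_cats_per_col : List Int := [2, 3, 1]

def Spec_get_index_ranges_from_n_cats_per_col (n_categories_per_column : List Int) (out : List (List Int)) : Prop := out = get_index_ranges_from_n_cats_per_col_alt n_categories_per_column
instance (n_categories_per_column : List Int) (out : List (List Int)) : Decidable (Spec_get_index_ranges_from_n_cats_per_col n_categories_per_column out) := by unfold Spec_get_index_ranges_from_n_cats_per_col; infer_instance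

-- ===== CLAIM (what is proved, stated in full; the proofs are below) =====
def Claim_equal_get_index_ranges_from_n_cats_per_col : Prop := ∀ (n_categories_per_column : List Int), Dom_get_index_ranges_from_n_cats_per_col n_categories_per_column → Pre_get_index_ranges_from_n_cats_per_col n_categories_per_column → Spec_get_index_ranges_from_n_cats_per_col n_categories_per_column (get_index_ranges_from_n_cats_per_col n_categories_per_column)

-- ===== LEMMAS AND PROOFS =====

theorem pvGetLast_bang_eq (bs : List Int) : bs.getLast! = bs.getLast?.getD 0 := by
  cases bs with
  | nil => simp [List.getLast!]
  | cons a t => simp [List.getLast!, List.getLast?_eq_some_getLast]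

-- The common specification: the list of ranges starting at `off`.
def pvRanges : List Int → Int → List (List Int)
  | [], _ => []
  | n :: xs, off => PySem.List.pyRange off (off + n) 1 :: pvRanges xs (off + n)

theorem aFold_eq (xs : List Int) (acc : List (List Int)) (off : Int) :
    (xs.foldl
      (fun (st : List (List Int) × Int) n_cats =>
        (st.1 ++ [PySem.List.pyRange st.2 (st.2 + n_cats) 1], st.2 + n_cats))
      (acc, off)).1 = acc ++ pvRanges xs off := by
  induction xs generalizing acc off with
  | nil => simp [pvRanges]
  | cons n xs ih => simp [pvRanges, List.foldl_cons, ih]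

theorem zip_tail_append (bs : List Int) (x : Int) (h : bs ≠ []) :
    ((bs ++ [x]).zip ((bs ++ [x]).drop 1)) = bs.zip (bs.drop 1) ++ [(bs.getLast!, x)] := by
  induction bs with
  | nil => exact absurd rfl h
  | cons a bs ih =>
    cases bs with
    | nil => simp
    | cons b bs' =>
      have H := ih (by simp)
      simp only [List.cons_append, List.drop_one, List.tail_cons, List.zip_cons_cons] at H ⊢
      rw [H, show (a :: b :: bs').getLast! = (b :: bs').getLast! by
        simp [List.getLast!, List.getLast]]

theorem boundsFold_zip (xs : List Int) (bs : List Int) (off : Int)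
    (hne : bs ≠ []) (hlast : bs.getLast! = off) :
    ((xs.foldl (fun bs n_cats => bs ++ [bs.getLast! + n_cats]) bs).zip
      ((xs.foldl (fun bs n_cats => bs ++ [bs.getLast! + n_cats]) bs).drop 1)).map
        (fun p => PySem.List.pyRange p.1 p.2 1)
    = (bs.zip (bs.drop 1)).map (fun p => PySem.List.pyRange p.1 p.2 1) ++ pvRanges xs off := by
  induction xs generalizing bs off with
  | nil => simp [pvRanges]
  | cons n xs ih =>
    have hne' : bs ++ [bs.getLast! + n] ≠ [] := by simp
    have hlast' : (bs ++ [bs.getLast! + n]).getLast! = off + n := by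
      simp
      rw [← pvGetLast_bang_eq bs]
      exact hlast
    rw [List.foldl_cons, ih _ _ hne' hlast', zip_tail_append bs _ hne, List.map_append, hlast]
    simp [pvRanges]

-- ===== VERDICT (by name: the statement is the Claim_ definition above) =====
theorem get_index_ranges_from_n_cats_per_col_spec : Claim_equal_get_index_ranges_from_n_cats_per_col := by
  intro xs _ _
  unfold Spec_get_index_ranges_from_n_cats_per_col
  unfold get_index_ranges_from_n_cats_per_col get_index_ranges_from_n_cats_per_col_alt pvBounds
  rw [aFold_eq, boundsFold_zip xs [0] 0 (by simp) (by simp [List.getLast!])]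
  simp
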